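-- pv_equiv track=rewrite | github.com/KKogaa/mrc-task | data/recores_data.py | concatenate_data
-- ===== SOURCE A (Python) =====
-- def concatenate_data(row, format, option):
--     """
--     Concatenates data into the text from the row given the specified order in the format
--     Fomat tokens:
--     QUESTION
--     OPTION
--     REASON
--     CONTEXT
--     MODIFIED_CONTEXT
--     SEP
--     SPACE
--     """
--     text = ""
--     for token in format:
--         if token == "QUESTION":
--             text = text + row["question"]
--
--         if token == "OPTION":
--             text = text + row[option]
--
--         if token == "REASON":
--             text = text + row["reason"]
--
--         if token == "CONTEXT":
--             text = text + row["context"]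
--
--         if token == "SEP":
--             text = text + "[SEP]"
--
--         if token == "SPACE":
--             text = text + " "
--
--         if token == "MODIFIED_CONTEXT":
--             text = text + row["modified_context"]
--
--     return text
-- ===== SOURCE B (Python) =====
-- def concatenate_data(row, format, option):
--     # Run-length strategy: compress consecutive equal tokens into runs,
--     # resolve each run's piece once, emit piece * run_length, join at the end.
--     parts = []
--     i = 0
--     n = len(format)
--     while i < n:
--         token = format[i]
--         j = i + 1
--         while j < n and format[j] == token:
--             j += 1
--         if token == "QUESTION":
--             piece = row["question"]
--         elif token == "OPTION":
--             piece = row[option]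
--         elif token == "REASON":
--             piece = row["reason"]
--         elif token == "CONTEXT":
--             piece = row["context"]
--         elif token == "SEP":
--             piece = "[SEP]"
--         elif token == "SPACE":
--             piece = " "
--         elif token == "MODIFIED_CONTEXT":
--             piece = row["modified_context"]
--         else:
--             piece = None
--         if piece is not None:
--             parts.append(piece * (j - i))
--         i = j
--     return "".join(parts)
-- ===== Notes on version B (the rewrite author's own statement) =====
-- stated objective: alternative
-- what changed: Replaced A's per-token accumulator loop by run-length compression: an outer loop splits format into runs of consecutive equal tokens, resolves each run's piece once, emits piece*(run length), and joins the pieces at the end.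
-- outside the precondition, e.g. on concatenate_data({}, ['QUESTION'], 'x'): A raises KeyError, B raises KeyError
import Mathlib
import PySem

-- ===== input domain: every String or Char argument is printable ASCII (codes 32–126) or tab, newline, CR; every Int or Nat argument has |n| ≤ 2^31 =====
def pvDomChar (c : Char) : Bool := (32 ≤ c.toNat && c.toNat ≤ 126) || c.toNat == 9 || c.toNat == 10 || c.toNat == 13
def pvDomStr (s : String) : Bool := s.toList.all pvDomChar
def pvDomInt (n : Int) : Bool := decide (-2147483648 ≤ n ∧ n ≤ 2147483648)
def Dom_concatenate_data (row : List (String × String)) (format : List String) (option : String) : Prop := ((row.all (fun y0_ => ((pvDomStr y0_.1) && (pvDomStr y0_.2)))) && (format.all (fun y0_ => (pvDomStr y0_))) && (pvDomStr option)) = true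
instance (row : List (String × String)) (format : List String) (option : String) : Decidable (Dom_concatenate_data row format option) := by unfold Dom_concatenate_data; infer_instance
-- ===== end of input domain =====

-- B replaces A's token-by-token accumulation by run-length compression: consecutive
-- equal tokens form a run, the run's piece is resolved once and emitted piece*(run
-- length), the pieces joined at the end (alternative algorithm, same cost).

-- ===== PORT A =====
-- one loop step of A: the seven independent `if` statements in source order
-- (row[k] is ported as (Dict.mk row).get? k; Pre_ excludes the KeyError cases,
-- so the .getD "" default is never reached inside the claim)
def pvStepA (row : List (String × String)) (option : String) (text : String) (token : String) : String :=
  let text := if token = "QUESTION" then text ++ ((PySem.Dict.mk row).get? "question").getD "" else text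
  let text := if token = "OPTION" then text ++ ((PySem.Dict.mk row).get? option).getD "" else text
  let text := if token = "REASON" then text ++ ((PySem.Dict.mk row).get? "reason").getD "" else text
  let text := if token = "CONTEXT" then text ++ ((PySem.Dict.mk row).get? "context").getD "" else text
  let text := if token = "SEP" then text ++ "[SEP]" else text
  let text := if token = "SPACE" then text ++ " " else text
  let text := if token = "MODIFIED_CONTEXT" then text ++ ((PySem.Dict.mk row).get? "modified_context").getD "" else text
  text

def concatenate_data (row : List (String × String)) (format : List String) (option : String) : String :=
  format.foldl (pvStepA row option) ""

-- ===== PORT B =====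
-- B's if/elif resolver: the piece of one token, none for an unrecognised token
def pvPieceB (row : List (String × String)) (option : String) (token : String) : Option String :=
  if token = "QUESTION" then some (((PySem.Dict.mk row).get? "question").getD "")
  else if token = "OPTION" then some (((PySem.Dict.mk row).get? option).getD "")
  else if token = "REASON" then some (((PySem.Dict.mk row).get? "reason").getD "")
  else if token = "CONTEXT" then some (((PySem.Dict.mk row).get? "context").getD "")
  else if token = "SEP" then some "[SEP]"
  else if token = "SPACE" then some " "
  else if token = "MODIFIED_CONTEXT" then some (((PySem.Dict.mk row).get? "modified_context").getD "")
  else none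

-- Python's piece * k
def pvRepB (s : String) (k : Nat) : String := String.join (List.replicate k s)

-- the outer while loop of B: split off the run of tokens equal to the head,
-- resolve its piece once, emit piece * (run length)
def pvRunsB (row : List (String × String)) (option : String) : List String → List String
  | [] => []
  | t :: rest =>
    let run := rest.takeWhile (· = t)
    let rest' := rest.dropWhile (· = t)
    match pvPieceB row option t with
    | some v => pvRepB v (run.length + 1) :: pvRunsB row option rest'
    | none => pvRunsB row option rest'
  termination_by l => l.length
  decreasing_by
    simpa using Nat.lt_succ_of_le (List.length_dropWhile_le (· = t) rest)

def concatenate_data_alt (row : List (String × String)) (format : List String) (option : String) : String :=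
  String.join (pvRunsB row option format)

-- ===== PRECONDITION & SPEC =====
-- Pre_ excludes exactly the KeyError inputs: a format token naming a row key that is
-- absent (A raises KeyError there; B raises identically, but the ports substitute "").
def Pre_concatenate_data (row : List (String × String)) (format : List String) (option : String) : Prop :=
  ∀ token ∈ format,
    (token = "QUESTION" → (PySem.Dict.mk row).contains "question" = true) ∧
    (token = "OPTION" → (PySem.Dict.mk row).contains option = true) ∧
    (token = "REASON" → (PySem.Dict.mk row).contains "reason" = true) ∧
    (token = "CONTEXT" → (PySem.Dict.mk row).contains "context" = true) ∧
    (token = "MODIFIED_CONTEXT" → (PySem.Dict.mk row).contains "modified_context" = true)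
instance (row : List (String × String)) (format : List String) (option : String) : Decidable (Pre_concatenate_data row format option) := by unfold Pre_concatenate_data; infer_instance

def pvWitness_concatenate_data : (List (String × String)) × List String × String :=
  ([("question", "Q?"), ("opt", "yes"), ("context", "ctx")],
   ["QUESTION", "SPACE", "SPACE", "SEP", "OPTION", "CONTEXT"], "opt")

def Spec_concatenate_data (row : List (String × String)) (format : List String) (option : String) (out : String) : Prop := out = concatenate_data_alt row format option
instance (row : List (String × String)) (format : List String) (option : String) (out : String) : Decidable (Spec_concatenate_data row format option out) := by unfold Spec_concatenate_data; infer_instance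

-- ===== CLAIM (what is proved, stated in full; the proofs are below) =====
def Claim_equal_concatenate_data : Prop := ∀ (row : List (String × String)) (format : List String) (option : String), Dom_concatenate_data row format option → Pre_concatenate_data row format option → Spec_concatenate_data row format option (concatenate_data row format option)

-- ===== LEMMAS AND PROOFS =====
theorem pvFoldl_append_str (l : List String) (a : String) :
    l.foldl (fun r s => r ++ s) a = a ++ l.foldl (fun r s => r ++ s) "" := by
  induction l generalizing a with
  | nil => simp
  | cons x l ih =>
    simp only [List.foldl_cons]
    rw [ih (a ++ x), ih ("" ++ x)]
    simp [String.append_assoc]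

theorem pvJoin_cons (x : String) (l : List String) :
    String.join (x :: l) = x ++ String.join l := by
  simp only [String.join, List.foldl_cons]
  rw [pvFoldl_append_str]
  simp

-- the common normal form: per-token pieces of the whole format, joined
def pvCanon (row : List (String × String)) (option : String) (l : List String) : String :=
  String.join (l.filterMap (pvPieceB row option))

-- one loop step of A appends exactly the piece of the token (or nothing)
theorem pvStepA_eq_piece (row : List (String × String)) (option : String)
    (text token : String) :
    pvStepA row option text token = text ++ ((pvPieceB row option token).getD "") := by
  unfold pvStepA pvPieceB
  split_ifs <;> simp_all

-- A's fold computes the normal form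
theorem pvFoldA_eq_canon (row : List (String × String)) (option : String)
    (format : List String) (text : String) :
    format.foldl (pvStepA row option) text = text ++ pvCanon row option format := by
  induction format generalizing text with
  | nil => simp [pvCanon, String.join]
  | cons t rest ih =>
    simp only [List.foldl_cons, ih, pvStepA_eq_piece, pvCanon, List.filterMap_cons]
    cases h : pvPieceB row option t with
    | none => simp
    | some v => rw [pvJoin_cons]; simp [String.append_assoc]

theorem pvCanon_append (row : List (String × String)) (option : String)
    (l₁ l₂ : List String) :
    pvCanon row option (l₁ ++ l₂) = pvCanon row option l₁ ++ pvCanon row option l₂ := by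
  induction l₁ with
  | nil => simp [pvCanon, String.join]
  | cons x l ih =>
    simp only [pvCanon, List.cons_append, List.filterMap_cons] at *
    cases pvPieceB row option x <;> simp_all [pvJoin_cons, String.append_assoc]

-- a run of tokens all equal to t canonicalises to piece * (run length)
theorem pvCanon_run (row : List (String × String)) (option : String)
    (t v : String) (run : List String) (hall : ∀ x ∈ run, x = t)
    (hv : pvPieceB row option t = some v) :
    pvCanon row option run = pvRepB v run.length := by
  induction run with
  | nil => simp [pvCanon, pvRepB, String.join]
  | cons x l ih =>
    have hx : x = t := hall x (by simp)
    have hl : ∀ y ∈ l, y = t := fun y hy => hall y (by simp [hy])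
    simp only [pvCanon, List.filterMap_cons, hx, hv, pvRepB, List.length_cons,
      List.replicate_succ] at *
    rw [pvJoin_cons, pvJoin_cons, ih hl]

theorem pvCanon_run_none (row : List (String × String)) (option : String)
    (t : String) (run : List String) (hall : ∀ x ∈ run, x = t)
    (hv : pvPieceB row option t = none) :
    pvCanon row option run = "" := by
  induction run with
  | nil => simp [pvCanon, String.join]
  | cons x l ih =>
    have hx : x = t := hall x (by simp)
    have hl : ∀ y ∈ l, y = t := fun y hy => hall y (by simp [hy])
    simp only [pvCanon, List.filterMap_cons, hx, hv] at *
    exact ih hl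

-- B's run loop computes the normal form
theorem pvRunsB_eq_canon_aux (row : List (String × String)) (option : String) :
    ∀ (n : Nat) (format : List String), format.length ≤ n →
      String.join (pvRunsB row option format) = pvCanon row option format := by
  intro n
  induction n with
  | zero =>
    intro format h
    have : format = [] := List.eq_nil_of_length_eq_zero (Nat.le_zero.mp h)
    subst this
    simp [pvRunsB, pvCanon, String.join]
  | succ n ih =>
    intro format h
    cases format with
    | nil => simp [pvRunsB, pvCanon, String.join]
    | cons t rest =>
      have hrun : ∀ x ∈ rest.takeWhile (· = t), x = t := by
        intro x hx
        simpa using List.mem_takeWhile_imp hx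
      have hall : ∀ x ∈ t :: rest.takeWhile (· = t), x = t := by
        intro x hx
        rcases List.mem_cons.mp hx with h' | h'
        · exact h'
        · exact hrun x h'
      have hdecomp : t :: rest = (t :: rest.takeWhile (· = t)) ++ rest.dropWhile (· = t) := by
        simp [List.takeWhile_append_dropWhile]
      have hlen : (rest.dropWhile (· = t)).length ≤ n :=
        le_trans (List.length_dropWhile_le _ rest) (Nat.le_of_succ_le_succ h)
      rw [pvRunsB]
      cases hv : pvPieceB row option t with
      | some v =>
        rw [pvJoin_cons, ih _ hlen, hdecomp, pvCanon_append]
        congr 1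
        have := pvCanon_run row option t v (t :: rest.takeWhile (· = t)) hall hv
        simpa using this.symm
      | none =>
        rw [ih _ hlen, hdecomp, pvCanon_append,
          pvCanon_run_none row option t (t :: rest.takeWhile (· = t)) hall hv]
        simp

theorem pvRunsB_eq_canon (row : List (String × String)) (option : String)
    (format : List String) :
    String.join (pvRunsB row option format) = pvCanon row option format :=
  pvRunsB_eq_canon_aux row option format.length format (Nat.le_refl _)

-- ===== VERDICT (by name: the statement is the Claim_ definition above) =====
theorem concatenate_data_spec : Claim_equal_concatenate_data := by
  intro row format option _ _
  unfold Spec_concatenate_data concatenate_data concatenate_data_alt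
  rw [pvRunsB_eq_canon]
  simpa using pvFoldA_eq_canon row option format ""
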